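-- pv_equiv track=rewrite | github.com/criex2281337/pedproj | app.py | canonical_category
-- ===== SOURCE A (Python) =====
-- from typing import Tuple, List, Dict, Any
--
-- def canonical_category(name: str, tags: List[str]) -> str:
--     n = (name or "").lower()
--     t = " ".join(tags or []).lower()
--
--     def has(*ws):
--         return any(w in n or w in t for w in ws)
--
--     # гарниры / крупы
--     if has("penne", "pasta", "макарон", "паста"):
--         return "pasta"
--     if has("rice", "рис"):
--         return "rice"
--     if has("греч", "buckwheat"):
--         return "buckwheat"
--     if has("картоф", "potato", "potatoes"):
--         return "potato"
--
--     # хлеб / булочки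
--     if has("bread", "хлеб", "батон", "булк", "bun", "baguette"):
--         return "bread"
--
--     # колбасные изделия, хот-доги, сосиски
--     if has("sausage", "sausages", "wurst", "сосиск", "колбас", "сардель", "hot dog", "frankfurter"):
--         return "sausages"
--
--     # мясо / рыба
--     if has("breast", "грудк"):
--         return "chicken_breast"
--     if has("drumstick", "голен", "ножк"):
--         return "chicken_drumstick"
--     if has("thigh", "бедро"):
--         return "chicken_thigh"
--     if has("salmon", "лосос", "семг"):
--         return "salmon"
--     if has("fish", "рыб"):
--         return "fish_lean"
--     if has("steak", "стейк", "бифштекс", "говядин"):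
--         return "beef_steak"
--     if has("pork", "свини"):
--         return "pork"
--
--     # суши / пельмени / сыр
--     if has("суши", "sushi"):
--         return "sushi"
--     if has("сыр", "cheese"):
--         return "cheese"
--     if has("dumpling", "пельм", "вареник", "манты"):
--         return "dumplings"
--
--     # овощи и фрукты
--     if has("огур", "помид", "томат", "овощ", "vegetable", "cucumber", "tomato", "salad"):
--         return "vegetables"
--     if has("fruit", "фрукт", "яблок", "банан", "ягод"):
--         return "fruits"
--
--     # по умолчанию — среднекалорийное блюдо
--     return "unknown"
-- ===== SOURCE B (Python) =====
-- # B: position-driven scan. Instead of testing each pattern group with `in`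
-- # in priority order (A's if-chain), walk every start position of the two
-- # texts, look up the patterns that begin with that character in a
-- # first-character index, and keep the minimum priority of any match;
-- # the category of that minimum is the answer.
--
-- CATEGORIES = ["pasta", "rice", "buckwheat", "potato", "bread", "sausages",
--               "chicken_breast", "chicken_drumstick", "chicken_thigh", "salmon",
--               "fish_lean", "beef_steak", "pork", "sushi", "cheese", "dumplings",
--               "vegetables", "fruits"]
--
-- PATTERNS = [("penne", 0), ("pasta", 0), ("макарон", 0), ("паста", 0),
--             ("rice", 1), ("рис", 1),
--             ("греч", 2), ("buckwheat", 2),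
--             ("картоф", 3), ("potato", 3), ("potatoes", 3),
--             ("bread", 4), ("хлеб", 4), ("батон", 4), ("булк", 4), ("bun", 4), ("baguette", 4),
--             ("sausage", 5), ("sausages", 5), ("wurst", 5), ("сосиск", 5), ("колбас", 5),
--             ("сардель", 5), ("hot dog", 5), ("frankfurter", 5),
--             ("breast", 6), ("грудк", 6),
--             ("drumstick", 7), ("голен", 7), ("ножк", 7),
--             ("thigh", 8), ("бедро", 8),
--             ("salmon", 9), ("лосос", 9), ("семг", 9),
--             ("fish", 10), ("рыб", 10),
--             ("steak", 11), ("стейк", 11), ("бифштекс", 11), ("говядин", 11),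
--             ("pork", 12), ("свини", 12),
--             ("суши", 13), ("sushi", 13),
--             ("сыр", 14), ("cheese", 14),
--             ("dumpling", 15), ("пельм", 15), ("вареник", 15), ("манты", 15),
--             ("огур", 16), ("помид", 16), ("томат", 16), ("овощ", 16),
--             ("vegetable", 16), ("cucumber", 16), ("tomato", 16), ("salad", 16),
--             ("fruit", 17), ("фрукт", 17), ("яблок", 17), ("банан", 17), ("ягод", 17)]
--
-- FIRST = {}
-- for _w, _p in PATTERNS:
--     FIRST.setdefault(_w[0], []).append((_w, _p))
--
-- def canonical_category(name, tags):
--     n = (name or "").lower()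
--     t = " ".join(tags or []).lower()
--     best = len(CATEGORIES)
--     for text in (n, t):
--         for i, c in enumerate(text):
--             for w, p in FIRST.get(c, ()):
--                 if p < best and text.startswith(w, i):
--                     best = p
--     return CATEGORIES[best] if best < len(CATEGORIES) else "unknown"
-- ===== Notes on version B (the rewrite author's own statement) =====
-- stated objective: alternative
-- what changed: Replaces A's 18-branch if-chain of substring ('in') tests with a position-driven scan: one pass over every start offset of name and joined tags, looking up candidate keywords in a first-character index (dict of buckets) and testing them with startswith, keeping the minimum matched priority in an accumulator that is finally mapped to its category.
import Mathlib
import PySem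

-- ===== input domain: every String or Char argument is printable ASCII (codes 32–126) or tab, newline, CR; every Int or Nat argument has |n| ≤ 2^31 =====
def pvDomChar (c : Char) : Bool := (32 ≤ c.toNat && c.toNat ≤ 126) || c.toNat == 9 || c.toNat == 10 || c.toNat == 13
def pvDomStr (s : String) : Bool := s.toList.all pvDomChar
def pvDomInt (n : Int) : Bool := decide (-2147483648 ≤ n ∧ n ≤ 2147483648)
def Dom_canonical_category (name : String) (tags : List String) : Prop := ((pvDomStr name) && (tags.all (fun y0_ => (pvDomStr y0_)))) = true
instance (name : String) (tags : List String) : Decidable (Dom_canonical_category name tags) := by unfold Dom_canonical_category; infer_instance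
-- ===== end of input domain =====

-- B replaces A's priority-ordered if-chain of substring tests by a position-driven
-- scan of the two texts: a first-character index over a flat keyword table plus a
-- min-priority accumulator (objective: alternative; same asymptotic cost).

-- ===== PORT A =====
-- helper 'has(*ws)': any(w in n or w in t for w in ws)
def pvHas (n t : String) (ws : List String) : Bool :=
  ws.any (fun w => PySem.Str.isIn w n || PySem.Str.isIn w t)

def canonical_category (name : String) (tags : List String) : String :=
  let n := PySem.Str.lower (if name == "" then "" else name)   -- (name or "").lower()
  let t := PySem.Str.lower (PySem.Str.join " " (if tags == [] then [] else tags))  -- " ".join(tags or []).lower()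
  if pvHas n t ["penne", "pasta", "макарон", "паста"] then "pasta"
  else if pvHas n t ["rice", "рис"] then "rice"
  else if pvHas n t ["греч", "buckwheat"] then "buckwheat"
  else if pvHas n t ["картоф", "potato", "potatoes"] then "potato"
  else if pvHas n t ["bread", "хлеб", "батон", "булк", "bun", "baguette"] then "bread"
  else if pvHas n t ["sausage", "sausages", "wurst", "сосиск", "колбас", "сардель", "hot dog", "frankfurter"] then "sausages"
  else if pvHas n t ["breast", "грудк"] then "chicken_breast"
  else if pvHas n t ["drumstick", "голен", "ножк"] then "chicken_drumstick"
  else if pvHas n t ["thigh", "бедро"] then "chicken_thigh"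
  else if pvHas n t ["salmon", "лосос", "семг"] then "salmon"
  else if pvHas n t ["fish", "рыб"] then "fish_lean"
  else if pvHas n t ["steak", "стейк", "бифштекс", "говядин"] then "beef_steak"
  else if pvHas n t ["pork", "свини"] then "pork"
  else if pvHas n t ["суши", "sushi"] then "sushi"
  else if pvHas n t ["сыр", "cheese"] then "cheese"
  else if pvHas n t ["dumpling", "пельм", "вареник", "манты"] then "dumplings"
  else if pvHas n t ["огур", "помид", "томат", "овощ", "vegetable", "cucumber", "tomato", "salad"] then "vegetables"
  else if pvHas n t ["fruit", "фрукт", "яблок", "банан", "ягод"] then "fruits"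
  else "unknown"

-- ===== PORT B =====
def pvCategories : List String :=
  ["pasta", "rice", "buckwheat", "potato", "bread", "sausages",
   "chicken_breast", "chicken_drumstick", "chicken_thigh", "salmon",
   "fish_lean", "beef_steak", "pork", "sushi", "cheese", "dumplings",
   "vegetables", "fruits"]

def pvPatterns : List (String × Nat) :=
  [("penne", 0), ("pasta", 0), ("макарон", 0), ("паста", 0),
   ("rice", 1), ("рис", 1),
   ("греч", 2), ("buckwheat", 2),
   ("картоф", 3), ("potato", 3), ("potatoes", 3),
   ("bread", 4), ("хлеб", 4), ("батон", 4), ("булк", 4), ("bun", 4), ("baguette", 4),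
   ("sausage", 5), ("sausages", 5), ("wurst", 5), ("сосиск", 5), ("колбас", 5),
   ("сардель", 5), ("hot dog", 5), ("frankfurter", 5),
   ("breast", 6), ("грудк", 6),
   ("drumstick", 7), ("голен", 7), ("ножк", 7),
   ("thigh", 8), ("бедро", 8),
   ("salmon", 9), ("лосос", 9), ("семг", 9),
   ("fish", 10), ("рыб", 10),
   ("steak", 11), ("стейк", 11), ("бифштекс", 11), ("говядин", 11),
   ("pork", 12), ("свини", 12),
   ("суши", 13), ("sushi", 13),
   ("сыр", 14), ("cheese", 14),
   ("dumpling", 15), ("пельм", 15), ("вареник", 15), ("манты", 15),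
   ("огур", 16), ("помид", 16), ("томат", 16), ("овощ", 16),
   ("vegetable", 16), ("cucumber", 16), ("tomato", 16), ("salad", 16),
   ("fruit", 17), ("фрукт", 17), ("яблок", 17), ("банан", 17), ("ягод", 17)]

-- module-level index: for w, p in PATTERNS: FIRST.setdefault(w[0], []).append((w, p))
-- (w[0] is exact via headD since every pattern in PATTERNS is a nonempty literal)
def pvFirst : PySem.Dict Char (List (String × Nat)) :=
  pvPatterns.foldl (fun d wp =>
    d.insert (wp.1.toList.headD ' ') (d.getD (wp.1.toList.headD ' ') [] ++ [wp])) PySem.Dict.empty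

-- inner loop body: for w, p in FIRST.get(c, ()): if p < best and text.startswith(w, i): best = p
-- (text.startswith(w, i) is exact as a prefix test on text.drop i.toNat for 0 ≤ i ≤ len(text))
def pvStep (s : List Char) (i : Int) (c : Char) (b : Nat) : Nat :=
  (pvFirst.getD c []).foldl (fun b wp =>
    if wp.2 < b && PySem.Chars.startswith (s.drop i.toNat) wp.1.toList then wp.2 else b) b

-- middle loop: for i, c in enumerate(text)
def pvScanText (s : List Char) (b : Nat) : Nat :=
  (PySem.List.enumerate s).foldl (fun b ic => pvStep s ic.1 ic.2 b) b

def canonical_category_alt (name : String) (tags : List String) : String :=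
  let n := PySem.Str.lower (if name == "" then "" else name)
  let t := PySem.Str.lower (PySem.Str.join " " (if tags == [] then [] else tags))
  let best := pvScanText t.toList (pvScanText n.toList pvCategories.length)  -- for text in (n, t)
  if best < pvCategories.length then pvCategories.getD best "unknown" else "unknown"

-- ===== PRECONDITION & SPEC =====
def Spec_canonical_category (name : String) (tags : List String) (out : String) : Prop := out = canonical_category_alt name tags
instance (name : String) (tags : List String) (out : String) : Decidable (Spec_canonical_category name tags out) := by unfold Spec_canonical_category; infer_instance

-- ===== CLAIM (what is proved, stated in full; the proofs are below) =====
def Claim_equal_canonical_category : Prop := ∀ (name : String) (tags : List String), Dom_canonical_category name tags → Spec_canonical_category name tags (canonical_category name tags)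

-- ===== LEMMAS AND PROOFS =====

-- generic min-accumulating fold over a pattern list, parameterised by an occurrence test
def pvF (occ : String → Bool) (l : List (String × Nat)) (b : Nat) : Nat :=
  l.foldl (fun b wp => if occ wp.1 then min b wp.2 else b) b

lemma pvF_cons (occ : String → Bool) (wp : String × Nat) (l : List (String × Nat)) (b : Nat) :
    pvF occ (wp :: l) b = pvF occ l (if occ wp.1 then min b wp.2 else b) := rfl

lemma pvF_min (occ : String → Bool) (l : List (String × Nat)) (b c : Nat) :
    pvF occ l (min b c) = min b (pvF occ l c) := by
  induction l generalizing c with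
  | nil => rfl
  | cons wp rest ih =>
      rw [pvF_cons, pvF_cons]
      by_cases h : occ wp.1 = true
      · simp only [h, if_pos]
        rw [show min (min b c) wp.2 = min b (min c wp.2) by omega]
        exact ih (min c wp.2)
      · simp only [h, Bool.false_eq_true, if_neg, not_false_iff]
        exact ih c

lemma pvF_false (occ : String → Bool) (l : List (String × Nat)) (b : Nat)
    (h : ∀ w, occ w = false) : pvF occ l b = b := by
  induction l generalizing b with
  | nil => rfl
  | cons wp rest ih => rw [pvF_cons, h wp.1]; exact ih b

lemma pvF_combine (f g : String → Bool) (l : List (String × Nat)) (b : Nat) :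
    pvF g l (pvF f l b) = pvF (fun w => f w || g w) l b := by
  induction l generalizing b with
  | nil => rfl
  | cons wp rest ih =>
      simp only [pvF_cons]
      by_cases hf : f wp.1 = true <;> by_cases hg : g wp.1 = true <;>
        simp only [hf, hg, Bool.true_or, Bool.false_or, Bool.or_self, if_pos,
          Bool.false_eq_true, if_neg, not_false_iff]
      · rw [Nat.min_comm (pvF f rest (min b wp.2)) wp.2, ← pvF_min,
           show min wp.2 (min b wp.2) = min b wp.2 by omega]
        exact ih _
      · exact ih _
      · rw [Nat.min_comm (pvF f rest b) wp.2, ← pvF_min, Nat.min_comm wp.2 b]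
        exact ih _
      · exact ih b

lemma pvF_congr (f g : String → Bool) (l : List (String × Nat)) (b : Nat)
    (h : ∀ wp ∈ l, f wp.1 = g wp.1) : pvF f l b = pvF g l b := by
  induction l generalizing b with
  | nil => rfl
  | cons wp rest ih =>
      rw [pvF_cons, pvF_cons, h wp (List.mem_cons_self ..)]
      exact ih _ (fun x hx => h x (List.mem_cons_of_mem _ hx))

lemma pvPatterns_nonempty : ∀ wp ∈ pvPatterns, wp.1.toList ≠ [] := by decide

-- building the first-character index by repeated insert/append groups a list by key,
-- preserving order: the bucket of c is the filter of the list on key = c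
lemma pvGroup_getD (key : (String × Nat) → Char) (l : List (String × Nat))
    (d : PySem.Dict Char (List (String × Nat))) (c : Char) :
    (l.foldl (fun d wp => d.insert (key wp) (d.getD (key wp) [] ++ [wp])) d).getD c []
      = d.getD c [] ++ l.filter (fun wp => key wp == c) := by
  induction l generalizing d with
  | nil => simp
  | cons wp rest ih =>
      rw [List.foldl_cons, ih, List.filter_cons]
      by_cases h : key wp = c
      · rw [PySem.Dict.getD_insert]
        simp [h]
      · rw [PySem.Dict.getD_insert]
        simp [h, Ne.symm h]

-- elements dropped by a filter that cannot satisfy occ do not change pvF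
lemma pvF_filter (occ : String → Bool) (p : String × Nat → Bool) (l : List (String × Nat)) (b : Nat)
    (h : ∀ wp ∈ l, p wp = false → occ wp.1 = false) :
    pvF occ (l.filter p) b = pvF occ l b := by
  induction l generalizing b with
  | nil => rfl
  | cons wp rest ih =>
      rw [List.filter_cons]
      by_cases hp : p wp = true
      · rw [if_pos hp]
        simp only [pvF_cons]
        exact ih _ (fun x hx => h x (List.mem_cons_of_mem _ hx))
      · rw [if_neg hp]
        have hocc : ¬ occ wp.1 = true := by
          simp [h wp (List.mem_cons_self ..) (Bool.eq_false_iff.mpr hp)]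
        conv_rhs => rw [pvF_cons]
        simp only [hocc, Bool.false_eq_true, if_neg, not_false_iff]
        exact ih b (fun x hx => h x (List.mem_cons_of_mem _ hx))

-- a nonempty prefix of s.drop i starts with the character at position i
lemma pvHead_of_startswith (s w : List Char) (i : Nat) (c : Char) (hw : w ≠ [])
    (hc : (s.drop i).head? = some c)
    (hs : PySem.Chars.startswith (s.drop i) w = true) : w.headD ' ' = c := by
  have hpre := (PySem.Chars.startswith_iff _ _).mp hs
  obtain ⟨tl, htl⟩ := hpre
  obtain ⟨x, xs, rfl⟩ := List.exists_cons_of_ne_nil hw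
  rw [← htl] at hc
  simp only [List.cons_append, List.head?_cons, Option.some.injEq] at hc
  simpa using hc

-- pvStep at a position holding character c is a pvF over the whole pattern table
lemma pvStep_eq (s : List Char) (i : Int) (c : Char) (b : Nat)
    (hc : (s.drop i.toNat).head? = some c) :
    pvStep s i c b = pvF (fun w => PySem.Chars.startswith (s.drop i.toNat) w.toList) pvPatterns b := by
  unfold pvStep
  have hstep : (pvFirst.getD c []).foldl (fun b wp =>
      if wp.2 < b && PySem.Chars.startswith (s.drop i.toNat) wp.1.toList then wp.2 else b) b
      = pvF (fun w => PySem.Chars.startswith (s.drop i.toNat) w.toList) (pvFirst.getD c []) b := by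
    unfold pvF
    apply PySem.List.foldl_congr_mem
    intro b' wp _
    by_cases h : PySem.Chars.startswith (s.drop i.toNat) wp.1.toList = true
    · simp only [h, Bool.and_true]
      by_cases hlt : wp.2 < b' <;> simp [hlt] <;> omega
    · simp [h]
  have hbucket : pvFirst.getD c [] = pvPatterns.filter (fun wp => wp.1.toList.headD ' ' == c) := by
    unfold pvFirst
    rw [pvGroup_getD (fun wp => wp.1.toList.headD ' ') pvPatterns PySem.Dict.empty c]
    rfl
  rw [hstep, hbucket]
  apply pvF_filter
  intro wp hwp hkey
  rw [Bool.eq_false_iff]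
  intro hs
  have hh := pvHead_of_startswith s wp.1.toList i.toNat c (pvPatterns_nonempty wp hwp) hc hs
  simp only [List.headD_eq_head?_getD] at hh
  simp [hh] at hkey

-- the position loop over any (index, char) list is a pvF with the "starts at some i" test
lemma pvScanList_eq (s : List Char) (ics : List (Int × Char)) (b : Nat)
    (hics : ∀ ic ∈ ics, (s.drop ic.1.toNat).head? = some ic.2) :
    ics.foldl (fun b ic => pvStep s ic.1 ic.2 b) b
      = pvF (fun w => ics.any (fun ic => PySem.Chars.startswith (s.drop ic.1.toNat) w.toList)) pvPatterns b := by
  induction ics generalizing b with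
  | nil =>
      rw [List.foldl_nil, pvF_false]
      intro w; rfl
  | cons ic rest ih =>
      rw [List.foldl_cons, ih _ (fun x hx => hics x (List.mem_cons_of_mem _ hx)),
          pvStep_eq s ic.1 ic.2 b (hics ic (List.mem_cons_self ..)), pvF_combine]
      apply pvF_congr
      intro wp _
      simp [List.any_cons]

-- position-by-position search over enumerate = substring test, for nonempty patterns
lemma pvAnyPos_eq_isIn (s w : List Char) (hw : w ≠ []) :
    (PySem.List.enumerate s).any (fun ic => PySem.Chars.startswith (s.drop ic.1.toNat) w)
      = PySem.Chars.isIn w s := by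
  by_cases h : PySem.Chars.isIn w s = true
  · rw [h]
    rw [← PySem.Chars.exists_prefix_drop_iff_isIn] at h
    obtain ⟨j, hj⟩ := h
    have hjlt : j < s.length := by
      by_contra hgt
      have hnil : s.drop j = [] := List.drop_eq_nil_of_le (by omega)
      rw [hnil] at hj
      exact hw (List.prefix_nil.mp hj)
    simp only [List.any_eq_true]
    refine ⟨((j : Int), s[j]), ?_, ?_⟩
    · rw [PySem.List.mem_enumerate_iff]
      exact ⟨j, hjlt, by simp⟩
    · simpa using (PySem.Chars.startswith_iff _ _).mpr hj
  · rw [Bool.eq_false_iff.mpr h]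
    simp only [List.any_eq_false]
    intro ic _ hs
    apply h
    rw [← PySem.Chars.exists_prefix_drop_iff_isIn]
    exact ⟨ic.1.toNat, (PySem.Chars.startswith_iff _ _).mp hs⟩

-- A's rule table, used only by the proof to organise the case analysis
def pvRulesG : List (String × List String) :=
  [ ("pasta", ["penne", "pasta", "макарон", "паста"]),
    ("rice", ["rice", "рис"]),
    ("buckwheat", ["греч", "buckwheat"]),
    ("potato", ["картоф", "potato", "potatoes"]),
    ("bread", ["bread", "хлеб", "батон", "булк", "bun", "baguette"]),
    ("sausages", ["sausage", "sausages", "wurst", "сосиск", "колбас", "сардель", "hot dog", "frankfurter"]),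
    ("chicken_breast", ["breast", "грудк"]),
    ("chicken_drumstick", ["drumstick", "голен", "ножк"]),
    ("chicken_thigh", ["thigh", "бедро"]),
    ("salmon", ["salmon", "лосос", "семг"]),
    ("fish_lean", ["fish", "рыб"]),
    ("beef_steak", ["steak", "стейк", "бифштекс", "говядин"]),
    ("pork", ["pork", "свини"]),
    ("sushi", ["суши", "sushi"]),
    ("cheese", ["сыр", "cheese"]),
    ("dumplings", ["dumpling", "пельм", "вареник", "манты"]),
    ("vegetables", ["огур", "помид", "томат", "овощ", "vegetable", "cucumber", "tomato", "salad"]),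
    ("fruits", ["fruit", "фрукт", "яблок", "банан", "ягод"]) ]

def pvFlat (k : Nat) : List (String × List String) → List (String × Nat)
  | [] => []
  | (_, ps) :: rest => ps.map (fun w => (w, k)) ++ pvFlat (k + 1) rest

def pvFirstIdx (occ : String → Bool) : List (String × List String) → Nat
  | [] => 0
  | (_, ps) :: rest => if ps.any occ then 0 else pvFirstIdx occ rest + 1

def pvScanG (occ : String → Bool) : List (String × List String) → String
  | [] => "unknown"
  | (c, ps) :: rest => if ps.any occ then c else pvScanG occ rest

lemma pvF_append (occ : String → Bool) (l1 l2 : List (String × Nat)) (b : Nat) :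
    pvF occ (l1 ++ l2) b = pvF occ l2 (pvF occ l1 b) := by
  simp [pvF, List.foldl_append]

lemma pvF_const_prio (occ : String → Bool) (ps : List String) (k b : Nat) :
    pvF occ (ps.map (fun w => (w, k))) b = if ps.any occ then min b k else b := by
  induction ps generalizing b with
  | nil => simp [pvF]
  | cons w rest ih =>
      simp only [List.map_cons, pvF_cons, List.any_cons]
      by_cases h : occ w = true
      · simp only [h, if_pos, Bool.true_or]
        rw [ih (min b k)]
        by_cases h2 : rest.any occ = true <;> simp [h2] <;> omega
      · simp only [h, Bool.false_eq_true, if_neg, not_false_iff, Bool.false_or]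
        exact ih b

lemma pvF_flat (occ : String → Bool) (gs : List (String × List String)) (k b : Nat)
    (hb : b ≤ k + gs.length) :
    pvF occ (pvFlat k gs) b = min b (k + pvFirstIdx occ gs) := by
  induction gs generalizing k b with
  | nil =>
      simp only [pvFlat, pvFirstIdx, pvF, List.foldl_nil, List.length_nil] at *
      omega
  | cons g rest ih =>
      obtain ⟨c, ps⟩ := g
      simp only [pvFlat, pvFirstIdx, pvF_append, pvF_const_prio, List.length_cons] at *
      by_cases h : ps.any occ = true
      · simp only [h, if_pos]
        rw [show min b k = min k b by omega, pvF_min, ih (k + 1) b (by omega)]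
        omega
      · simp only [h, Bool.false_eq_true, if_neg, not_false_iff, ite_false]
        rw [ih (k + 1) b (by omega)]
        omega

lemma pvScanG_eq (occ : String → Bool) (gs : List (String × List String)) :
    pvScanG occ gs
      = if pvFirstIdx occ gs < gs.length
        then (gs.map Prod.fst).getD (pvFirstIdx occ gs) "unknown" else "unknown" := by
  induction gs with
  | nil => simp [pvScanG, pvFirstIdx]
  | cons g rest ih =>
      obtain ⟨c, ps⟩ := g
      simp only [pvScanG, pvFirstIdx, List.length_cons, List.map_cons]
      by_cases h : ps.any occ = true
      · simp [h]
      · simp only [h, Bool.false_eq_true, if_neg, not_false_iff, ite_false]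
        rw [ih]
        by_cases h2 : pvFirstIdx occ rest < rest.length
        · rw [if_pos h2, if_pos (by omega)]
          simp [List.getD]
        · rw [if_neg h2, if_neg (by omega)]

lemma pvPatterns_eq_flat : pvPatterns = pvFlat 0 pvRulesG := by decide


-- B's lowered-text computation equals the group scan of A's rule table
lemma pvScanText_eq (s : List Char) (b : Nat) :
    pvScanText s b
      = pvF (fun w => (PySem.List.enumerate s).any
          (fun ic => PySem.Chars.startswith (s.drop ic.1.toNat) w.toList)) pvPatterns b := by
  unfold pvScanText
  apply pvScanList_eq
  intro ic hic
  rw [PySem.List.mem_enumerate_iff] at hic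
  obtain ⟨k, hk, rfl⟩ := hic
  simp [List.head?_drop]

lemma pvCats_eq : pvRulesG.map Prod.fst = pvCategories := by decide

lemma pvKeyB (N T : String) :
    (if pvScanText T.toList (pvScanText N.toList pvCategories.length) < pvCategories.length
     then pvCategories.getD (pvScanText T.toList (pvScanText N.toList pvCategories.length)) "unknown"
     else "unknown")
    = pvScanG (fun w => PySem.Str.isIn w N || PySem.Str.isIn w T) pvRulesG := by
  have hocc : pvScanText T.toList (pvScanText N.toList pvCategories.length)
      = pvF (fun w => PySem.Str.isIn w N || PySem.Str.isIn w T) pvPatterns pvCategories.length := by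
    rw [pvScanText_eq, pvScanText_eq, pvF_combine]
    apply pvF_congr
    intro wp hwp
    rw [pvAnyPos_eq_isIn _ _ (pvPatterns_nonempty wp hwp),
        pvAnyPos_eq_isIn _ _ (pvPatterns_nonempty wp hwp)]
    simp
  have hflat : pvF (fun w => PySem.Str.isIn w N || PySem.Str.isIn w T) pvPatterns pvCategories.length
      = min pvCategories.length (0 + pvFirstIdx (fun w => PySem.Str.isIn w N || PySem.Str.isIn w T) pvRulesG) := by
    rw [pvPatterns_eq_flat]
    exact pvF_flat _ pvRulesG 0 pvCategories.length (by decide)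
  rw [hocc, hflat, pvScanG_eq]
  have hlen : pvCategories.length = pvRulesG.length := by decide
  set fi := pvFirstIdx (fun w => PySem.Str.isIn w N || PySem.Str.isIn w T) pvRulesG with hfi
  by_cases h : fi < pvRulesG.length
  · rw [if_pos (show min pvCategories.length (0 + fi) < pvCategories.length by omega), if_pos h,
        show min pvCategories.length (0 + fi) = fi by omega, pvCats_eq]
  · rw [if_neg (show ¬ min pvCategories.length (0 + fi) < pvCategories.length by omega), if_neg h]

lemma pvChainA (N T : String) :
    (if pvHas N T ["penne", "pasta", "макарон", "паста"] then "pasta"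
     else if pvHas N T ["rice", "рис"] then "rice"
     else if pvHas N T ["греч", "buckwheat"] then "buckwheat"
     else if pvHas N T ["картоф", "potato", "potatoes"] then "potato"
     else if pvHas N T ["bread", "хлеб", "батон", "булк", "bun", "baguette"] then "bread"
     else if pvHas N T ["sausage", "sausages", "wurst", "сосиск", "колбас", "сардель", "hot dog", "frankfurter"] then "sausages"
     else if pvHas N T ["breast", "грудк"] then "chicken_breast"
     else if pvHas N T ["drumstick", "голен", "ножк"] then "chicken_drumstick"
     else if pvHas N T ["thigh", "бедро"] then "chicken_thigh"
     else if pvHas N T ["salmon", "лосос", "семг"] then "salmon"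
     else if pvHas N T ["fish", "рыб"] then "fish_lean"
     else if pvHas N T ["steak", "стейк", "бифштекс", "говядин"] then "beef_steak"
     else if pvHas N T ["pork", "свини"] then "pork"
     else if pvHas N T ["суши", "sushi"] then "sushi"
     else if pvHas N T ["сыр", "cheese"] then "cheese"
     else if pvHas N T ["dumpling", "пельм", "вареник", "манты"] then "dumplings"
     else if pvHas N T ["огур", "помид", "томат", "овощ", "vegetable", "cucumber", "tomato", "salad"] then "vegetables"
     else if pvHas N T ["fruit", "фрукт", "яблок", "банан", "ягод"] then "fruits"
     else "unknown")
    = pvScanG (fun w => PySem.Str.isIn w N || PySem.Str.isIn w T) pvRulesG := by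
  rfl

-- ===== VERDICT (by name: the statement is the Claim_ definition above) =====
theorem canonical_category_spec : Claim_equal_canonical_category := by
  intro name tags _
  unfold Spec_canonical_category canonical_category canonical_category_alt
  rw [pvChainA, pvKeyB]
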